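-- pv_equiv track=rewrite | github.com/Pitterstummes/Kniffel | kniffel_forimport.py | calc_score_10
-- ===== SOURCE A (Python) =====
-- def calc_score_10(values):
--     # Calculate the score for scoreboard index 10: one pair
--     pairs = []
--     for value in set(values):
--         if values.count(value) >= 2:
--             pairs.append(value)
--     if pairs:
--         highest_pair = max(pairs)
--         return highest_pair * 2
--     else:
--         return 0
-- ===== SOURCE B (Python) =====
-- def calc_score_10(values):
--     # One pair: sort descending, first adjacent equal pair is the highest duplicate
--     s = sorted(values, reverse=True)
--     for prev, cur in zip(s, s[1:]):
--         if prev == cur: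
--             return prev * 2
--     return 0
-- ===== Notes on version B (the rewrite author's own statement) =====
-- stated objective: faster
-- what changed: Replaces the set-iteration calling values.count on each distinct element (quadratic) by sorting descending and scanning once for the first adjacent equal pair.
import Mathlib
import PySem

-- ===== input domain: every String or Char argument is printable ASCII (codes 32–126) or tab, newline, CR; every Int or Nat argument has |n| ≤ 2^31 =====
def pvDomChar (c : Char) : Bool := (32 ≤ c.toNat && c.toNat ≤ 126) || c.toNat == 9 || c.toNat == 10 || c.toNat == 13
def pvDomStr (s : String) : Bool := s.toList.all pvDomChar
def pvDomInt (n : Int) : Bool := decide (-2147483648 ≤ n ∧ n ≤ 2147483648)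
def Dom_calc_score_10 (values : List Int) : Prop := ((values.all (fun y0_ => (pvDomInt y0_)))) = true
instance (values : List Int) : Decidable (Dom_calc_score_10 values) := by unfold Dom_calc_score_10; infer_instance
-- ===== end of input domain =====

-- B replaces A's set-iteration-with-count by sort-descending + first-adjacent-equal scan (simpler single pass after sorting).


-- ===== PORT A =====
def calc_score_10 (values : List Int) : Int :=
  let pairs : List Int :=
    (PySem.Set.ofList values).foldl
      (fun pairs value =>
        if 2 ≤ PySem.List.count values value then pairs ++ [value] else pairs) []
  if pairs ≠ [] then
    match PySem.List.max? pairs (fun x => x) with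
    | some highest_pair => highest_pair * 2
    | none => 0  -- unreachable: pairs ≠ []
  else 0

-- ===== PORT B =====
-- the for-loop over zip(s, s[1:]) with early return
def calc_score_10_scan : List Int → Int
  | prev :: cur :: rest => if prev = cur then prev * 2 else calc_score_10_scan (cur :: rest)
  | _ => 0

def calc_score_10_alt (values : List Int) : Int :=
  calc_score_10_scan (PySem.List.sorted values (fun x => x) true)

-- ===== PRECONDITION & SPEC =====
def Spec_calc_score_10 (values : List Int) (out : Int) : Prop := out = calc_score_10_alt values
instance (values : List Int) (out : Int) : Decidable (Spec_calc_score_10 values out) := by unfold Spec_calc_score_10; infer_instance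

-- ===== CLAIM (what is proved, stated in full; the proofs are below) =====
def Claim_equal_calc_score_10 : Prop := ∀ (values : List Int), Dom_calc_score_10 values → Spec_calc_score_10 values (calc_score_10 values)

-- ===== LEMMAS AND PROOFS =====

-- two max?-inputs with the same members have the same max (Int, identity key)
lemma max?_id_eq_of_mem_iff (xs ys : List Int) (h : ∀ v, v ∈ xs ↔ v ∈ ys) :
    PySem.List.max? xs (fun x => x) = PySem.List.max? ys (fun x => x) := by
  cases hx : PySem.List.max? xs (fun x => x) with
  | none =>
    rw [PySem.List.max?_eq_none_iff] at hx
    subst hx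
    rcases hy : PySem.List.max? ys (fun x => x) with _ | m
    · rfl
    · have hm := PySem.List.max?_mem hy
      exact absurd ((h m).mpr hm) (by simp)
  | some m =>
    rcases hy : PySem.List.max? ys (fun x => x) with _ | m'
    · rw [PySem.List.max?_eq_none_iff] at hy
      subst hy
      exact absurd ((h m).mp (PySem.List.max?_mem hx)) (by simp)
    · have h1 : (m : Int) ≤ m' := PySem.List.max?_isMax hy m ((h m).mp (PySem.List.max?_mem hx))
      have h2 : (m' : Int) ≤ m := PySem.List.max?_isMax hx m' ((h m').mpr (PySem.List.max?_mem hy))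
      exact congrArg some (le_antisymm h1 h2)

-- abstract result: 2 * (greatest duplicated value), or 0
def maxDup (xs : List Int) : Int :=
  match PySem.List.max? (xs.filter (fun v => 2 ≤ xs.count v)) (fun x => x) with
  | some m => m * 2
  | none => 0

lemma maxDup_congr (xs ys : List Int) (h : ∀ v, (v ∈ xs ∧ 2 ≤ xs.count v) ↔ (v ∈ ys ∧ 2 ≤ ys.count v)) :
    maxDup xs = maxDup ys := by
  unfold maxDup
  rw [max?_id_eq_of_mem_iff _ (ys.filter (fun v => 2 ≤ ys.count v)) (by
    intro v; simpa [List.mem_filter] using h v)]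

lemma calc_score_10_eq_maxDup (values : List Int) : calc_score_10 values = maxDup values := by
  unfold calc_score_10 maxDup
  have hfold : (PySem.Set.ofList values).foldl
      (fun pairs value =>
        if 2 ≤ PySem.List.count values value then pairs ++ [value] else pairs) ([] : List Int) =
      (PySem.Set.ofList values).filter (fun v => decide (2 ≤ PySem.List.count values v)) := by
    simpa using PySem.List.foldl_append_if
      (fun v => decide (2 ≤ PySem.List.count values v)) (fun v : Int => v) (PySem.Set.ofList values) []
  simp only [hfold]
  have hmem : ∀ v : Int,
      v ∈ (PySem.Set.ofList values).filter (fun v => decide (2 ≤ PySem.List.count values v)) ↔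
      v ∈ values.filter (fun v => decide (2 ≤ values.count v)) := by
    intro v
    simp [List.mem_filter, PySem.Set.mem_ofList, PySem.List.count]
  rw [max?_id_eq_of_mem_iff _ (values.filter (fun v => decide (2 ≤ values.count v))) hmem]
  rcases hmax2 : PySem.List.max? (values.filter (fun v => decide (2 ≤ values.count v))) (fun x => x) with _ | m
  · have hnil : (PySem.Set.ofList values).filter (fun v => decide (2 ≤ PySem.List.count values v)) = [] := by
      rw [List.eq_nil_iff_forall_not_mem]
      intro v hv
      have hmem' := (hmem v).mp hv
      rw [(PySem.List.max?_eq_none_iff _ _).mp hmax2] at hmem'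
      simp at hmem'
    rw [if_neg (not_not_intro hnil)]
  · have hne : (PySem.Set.ofList values).filter (fun v => decide (2 ≤ PySem.List.count values v)) ≠ [] := by
      intro hnil
      have := (hmem m).mpr (PySem.List.max?_mem hmax2)
      rw [hnil] at this
      simp at this
    rw [if_pos hne]

lemma scan_eq_maxDup (l : List Int) (hs : l.Pairwise (fun a b => b ≤ a)) :
    calc_score_10_scan l = maxDup l := by
  induction l with
  | nil => rfl
  | cons a rest ih =>
    cases rest with
    | nil =>
      have hf : ([a] : List Int).filter (fun v => decide (2 ≤ ([a] : List Int).count v)) = [] := by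
        simp [List.count_cons]
      show (0 : Int) = maxDup [a]
      unfold maxDup
      rw [hf]
      rfl
    | cons b t =>
      have hle : ∀ x ∈ b :: t, x ≤ a := (List.pairwise_cons.mp hs).1
      have ihs : (b :: t).Pairwise (fun a b => b ≤ a) := (List.pairwise_cons.mp hs).2
      by_cases hab : a = b
      · -- first adjacent equal pair: a is the greatest duplicate
        subst hab
        have hmemf : a ∈ (a :: a :: t).filter (fun v => decide (2 ≤ (a :: a :: t).count v)) := by
          simp [List.mem_filter, List.count_cons]
        have hscan : calc_score_10_scan (a :: a :: t) = a * 2 := by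
          simp [calc_score_10_scan]
        rcases hmax2 : PySem.List.max? ((a :: a :: t).filter (fun v => decide (2 ≤ (a :: a :: t).count v))) (fun x => x) with _ | m
        · rw [PySem.List.max?_eq_none_iff] at hmax2
          rw [hmax2] at hmemf
          simp at hmemf
        · have hm_mem := PySem.List.max?_mem hmax2
          have hm_in : m ∈ a :: a :: t := (List.mem_filter.mp hm_mem).1
          have hma : m ≤ a := by
            rcases List.mem_cons.mp hm_in with h | h
            · exact le_of_eq h
            · exact hle m h
          have ham : a ≤ m := PySem.List.max?_isMax hmax2 a hmemf
          have hm : m = a := le_antisymm hma ham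
          rw [hscan]
          unfold maxDup
          rw [hmax2, hm]
      · -- a occurs only once: the scan skips it, and it is no pair
        have hblt : b < a := lt_of_le_of_ne (hle b (by simp)) (fun h => hab h.symm)
        have hnotin : a ∉ b :: t := by
          intro h
          rcases List.mem_cons.mp h with h | h
          · exact hab h
          · have : a ≤ b := (List.pairwise_cons.mp ihs).1 a h
            omega
        have hstep : maxDup (a :: b :: t) = maxDup (b :: t) := by
          apply maxDup_congr
          intro v
          constructor
          · rintro ⟨hv, hc⟩
            rcases List.mem_cons.mp hv with rfl | hv'
            · exfalso
              have h1 : (v :: b :: t).count v = 1 := by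
                simp [List.count_eq_zero.mpr hnotin]
              omega
            · have hva : v ≠ a := by rintro rfl; exact hnotin hv'
              have h1 : (a :: b :: t).count v = (b :: t).count v := by
                simp [List.count_cons, Ne.symm hva]
              exact ⟨hv', by omega⟩
          · rintro ⟨hv, hc⟩
            have hva : v ≠ a := by rintro rfl; exact hnotin hv
            have h1 : (a :: b :: t).count v = (b :: t).count v := by
              simp [List.count_cons, Ne.symm hva]
            exact ⟨List.mem_cons_of_mem _ hv, by omega⟩
        have hskip : calc_score_10_scan (a :: b :: t) = calc_score_10_scan (b :: t) := by
          simp [calc_score_10_scan, hab]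
        rw [hskip, ih ihs, hstep]

-- ===== VERDICT (by name: the statement is the Claim_ definition above) =====
theorem calc_score_10_spec : Claim_equal_calc_score_10 := by
  intro values _
  unfold Spec_calc_score_10 calc_score_10_alt
  rw [calc_score_10_eq_maxDup, scan_eq_maxDup _ (PySem.List.sorted_pairwise_rev values (fun x => x)),
    maxDup_congr (PySem.List.sorted values (fun x => x) true) values (by
      intro v
      have hperm := PySem.List.sorted_perm values (fun x => x) true
      rw [hperm.mem_iff, hperm.count_eq])]
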